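-- pv_equiv track=rewrite | github.com/thecfitz/python-final-project | compare_tweets.py | likes_word_time_list
-- ===== SOURCE A (Python) =====
-- policy_words = ['immigration','wall','iran','borders','tax','veterans','police','russia','michigan','leadership','jobs','trade','crime','military','china','isis','obamacare','economy','justice','mexico']
--
-- def likes_word_time_list(tweet_list):
--     likes_word_time = []
--     for word in policy_words:
--         nested_list = []
--         for row in tweet_list:
--             if row[0].count(word) == 1:
--                 nested_list.append((row[1], row[2]))
--         likes_word_time.append((word, nested_list))
--     return likes_word_time
-- ===== SOURCE B (Python) =====
-- policy_words = ['immigration','wall','iran','borders','tax','veterans','police','russia','michigan','leadership','jobs','trade','crime','military','china','isis','obamacare','economy','justice','mexico']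
--
-- def likes_word_time_list(tweet_list):
--     # Emit one (word_index, tweet_index) keyed event per match, sort the flat event
--     # stream by its key, then cut it into per-word runs with a single pointer sweep.
--     events = [((wi, ti), (row[1], row[2]))
--               for ti, row in enumerate(tweet_list)
--               for wi, word in enumerate(policy_words)
--               if row[0].count(word) == 1]
--     events.sort(key=lambda e: e[0])
--     out = []
--     k = 0
--     for wi, word in enumerate(policy_words):
--         group = []
--         while k < len(events) and events[k][0][0] == wi:
--             group.append(events[k][1])
--             k += 1
--         out.append((word, group))
--     return out
-- ===== Notes on version B (the rewrite author's own statement) =====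
-- stated objective: alternative
-- what changed: B replaces A's 20 independent word-by-word scans of the tweet list with a map/sort/reduce pipeline: it emits one (word_index, tweet_index)-keyed event per match in a single comprehension, sorts the flat event stream by its key, and slices it into per-word runs with one pointer sweep.
import Mathlib
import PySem

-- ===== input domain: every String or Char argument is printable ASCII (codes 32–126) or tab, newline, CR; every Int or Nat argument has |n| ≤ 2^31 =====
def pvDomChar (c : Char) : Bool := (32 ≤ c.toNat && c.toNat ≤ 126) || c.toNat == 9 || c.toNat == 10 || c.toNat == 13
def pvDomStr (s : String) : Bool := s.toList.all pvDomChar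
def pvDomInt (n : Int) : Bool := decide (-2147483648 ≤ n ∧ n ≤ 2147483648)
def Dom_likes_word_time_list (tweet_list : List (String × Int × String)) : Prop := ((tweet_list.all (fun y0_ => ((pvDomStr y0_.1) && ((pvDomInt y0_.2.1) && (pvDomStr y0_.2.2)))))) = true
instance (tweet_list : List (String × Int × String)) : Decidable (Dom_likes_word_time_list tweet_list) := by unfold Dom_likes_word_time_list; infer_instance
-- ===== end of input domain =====

-- B replaces A's 20 word-by-word scans of the tweet list by emitting one keyed event per
-- match, sorting the flat event stream by (word index, tweet index), and cutting it into
-- per-word runs with one pointer sweep (sort-then-scan grouping); return value proved equal.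

-- module constant shared by both versions
def policyWords : List String := ["immigration","wall","iran","borders","tax","veterans","police","russia","michigan","leadership","jobs","trade","crime","military","china","isis","obamacare","economy","justice","mexico"]

-- ===== PORT A =====
def likes_word_time_list (tweet_list : List (String × Int × String)) : List (String × (List (Int × String))) :=
  policyWords.foldl (fun likes_word_time word =>
    likes_word_time ++ [(word,
      tweet_list.foldl (fun nested_list row =>
        if PySem.Str.count row.1 word == 1 then nested_list ++ [(row.2.1, row.2.2)] else nested_list) [])]) []

-- ===== PORT B =====
-- the event comprehension: one ((word_index, tweet_index), (likes, time)) per match, row-major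
def lwtEvents (tweet_list : List (String × Int × String)) : List ((Int × Int) × (Int × String)) :=
  (PySem.List.enumerate tweet_list).flatMap (fun p =>
    (PySem.List.enumerate policyWords).filterMap (fun q =>
      if PySem.Str.count p.2.1 q.2 == 1 then some ((q.1, p.1), (p.2.2.1, p.2.2.2)) else none))

-- the inner 'while' loop: consume the run of events whose word index is wi, return (group, rest)
def lwtRun (wi : Int) : List ((Int × Int) × (Int × String)) → (List (Int × String)) × (List ((Int × Int) × (Int × String)))
  | [] => ([], [])
  | e :: rest =>
    if e.1.1 == wi then
      let pr := lwtRun wi rest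
      (e.2 :: pr.1, pr.2)
    else ([], e :: rest)

-- the outer 'for wi, word in enumerate(policy_words)' loop with the sweeping pointer
def lwtMerge : List (Int × String) → List ((Int × Int) × (Int × String)) → List (String × (List (Int × String)))
  | [], _ => []
  | q :: ws, evs =>
    let pr := lwtRun q.1 evs
    (q.2, pr.1) :: lwtMerge ws pr.2

def likes_word_time_list_alt (tweet_list : List (String × Int × String)) : List (String × (List (Int × String))) :=
  lwtMerge (PySem.List.enumerate policyWords)
    (PySem.List.sorted (lwtEvents tweet_list) (fun e => toLex e.1))

-- ===== PRECONDITION & SPEC =====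
def Spec_likes_word_time_list (tweet_list : List (String × Int × String)) (out : List (String × (List (Int × String)))) : Prop := out = likes_word_time_list_alt tweet_list
instance (tweet_list : List (String × Int × String)) (out : List (String × (List (Int × String)))) : Decidable (Spec_likes_word_time_list tweet_list out) := by unfold Spec_likes_word_time_list; infer_instance

-- ===== CLAIM (what is proved, stated in full; the proofs are below) =====
def Claim_equal_likes_word_time_list : Prop := ∀ (tweet_list : List (String × Int × String)), Dom_likes_word_time_list tweet_list → Spec_likes_word_time_list tweet_list (likes_word_time_list tweet_list)

-- ===== LEMMAS AND PROOFS =====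

-- the events of one word (index wi), in tweet order: one column of the grid
def lwtGroup (tl : List (String × Int × String)) (wi : Int) (w : String) : List ((Int × Int) × (Int × String)) :=
  (PySem.List.enumerate tl).filterMap (fun p =>
    if PySem.Str.count p.2.1 w == 1 then some ((wi, p.1), (p.2.2.1, p.2.2.2)) else none)

-- the event stream regrouped column-major: for each word in order, its events in tweet order
def lwtColMajor (tl : List (String × Int × String)) : List ((Int × Int) × (Int × String)) :=
  (PySem.List.enumerate policyWords).flatMap (fun q => lwtGroup tl q.1 q.2)

theorem lwt_enumerate_cons {α : Type} (x : α) (xs : List α) (s : Int) :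
    PySem.List.enumerate (x :: xs) s = (s, x) :: PySem.List.enumerate xs (s + 1) := by
  simp [PySem.List.enumerate]

-- the row-major and column-major traversals of a filtered grid are permutations
theorem lwt_swap_perm {α β γ : Type} (f : α → β → Option γ) (A : List α) (B : List β) :
    (A.flatMap fun a => B.filterMap (f a)).Perm (B.flatMap fun b => A.filterMap (fun a => f a b)) := by
  induction A with
  | nil => simp
  | cons a A ih =>
    simp only [List.filterMap_eq_flatMap_toList, List.flatMap_cons] at ih ⊢
    exact ((List.Perm.append_left _ ih).trans
      (List.flatMap_append_perm B (fun b => (f a b).toList)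
        (fun b => A.flatMap (fun a => (f a b).toList))))

theorem lwt_mem_group_fst {tl : List (String × Int × String)} {wi : Int} {w : String}
    {e : (Int × Int) × (Int × String)} (h : e ∈ lwtGroup tl wi w) : e.1.1 = wi := by
  unfold lwtGroup at h
  rw [List.mem_filterMap] at h
  obtain ⟨p, -, hp⟩ := h
  split at hp
  · cases hp; rfl
  · cases hp

-- inside one group the keys increase strictly in the lex order (same word, increasing tweet index)
theorem lwt_pairwise_group (tl : List (String × Int × String)) (wi : Int) (w : String) :
    (lwtGroup tl wi w).Pairwise (fun a b => toLex a.1 < toLex b.1) := by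
  unfold lwtGroup
  refine List.Pairwise.filterMap _ ?_ (PySem.List.pairwise_lt_enumerate tl 0)
  intro p p' hR b hb b' hb'
  split at hb
  · split at hb'
    · cases hb; cases hb'
      exact Prod.Lex.lt_iff.mpr (Or.inr ⟨rfl, hR⟩)
    · cases hb'
  · cases hb

-- the column-major stream is strictly increasing in the sort key
theorem lwt_pairwise_colmajor (tl : List (String × Int × String)) :
    (lwtColMajor tl).Pairwise (fun a b => toLex a.1 < toLex b.1) := by
  unfold lwtColMajor
  rw [List.pairwise_flatMap]
  refine ⟨fun q _ => lwt_pairwise_group tl q.1 q.2, ?_⟩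
  refine (PySem.List.pairwise_lt_enumerate policyWords 0).imp ?_
  intro q q' h x hx y hy
  have h1 := lwt_mem_group_fst hx
  have h2 := lwt_mem_group_fst hy
  refine Prod.Lex.lt_iff.mpr (Or.inl ?_)
  show x.1.1 < y.1.1
  omega

-- sorting the row-major event stream by key yields exactly the column-major stream
theorem lwt_sorted_events (tl : List (String × Int × String)) :
    PySem.List.sorted (lwtEvents tl) (fun e => toLex e.1) = lwtColMajor tl := by
  refine PySem.List.sorted_eq_of_perm_of_pairwise_lt _ _ _ ?_ (lwt_pairwise_colmajor tl)
  unfold lwtEvents lwtColMajor lwtGroup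
  exact (lwt_swap_perm _ _ _).symm

-- the run consumer takes exactly the leading group and leaves the rest
theorem lwt_run_spec (wi : Int) (g rest : List ((Int × Int) × (Int × String)))
    (hg : ∀ e ∈ g, e.1.1 = wi) (hr : ∀ e ∈ rest, e.1.1 ≠ wi) :
    lwtRun wi (g ++ rest) = (g.map (·.2), rest) := by
  induction g with
  | nil =>
    cases rest with
    | nil => rfl
    | cons e r =>
      have he : (e.1.1 == wi) = false := beq_eq_false_iff_ne.mpr (hr e (by simp))
      simp [lwtRun, he]
  | cons e g ih =>
    have he : (e.1.1 == wi) = true := beq_iff_eq.mpr (hg e (by simp))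
    simp [lwtRun, he, ih (fun x hx => hg x (by simp [hx])) ]

-- forgetting the keys of one column gives A's per-word (likes, time) list
theorem lwt_group_snd (tl : List (String × Int × String)) (s wi : Int) (w : String) :
    (((PySem.List.enumerate tl s).filterMap (fun p =>
        if PySem.Str.count p.2.1 w == 1 then some ((wi, p.1), (p.2.2.1, p.2.2.2)) else none)).map (·.2))
      = (tl.filter (fun row => PySem.Str.count row.1 w == 1)).map (fun row => (row.2.1, row.2.2)) := by
  induction tl generalizing s with
  | nil => simp [PySem.List.enumerate]
  | cons row tl ih =>
    rw [lwt_enumerate_cons, List.filterMap_cons, List.filter_cons]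
    by_cases h : PySem.Chars.count row.1.toList w.toList = 1 <;>
      (simp [h]; simpa using ih (s + 1))

-- the sweep over the concatenated columns reproduces A's word-by-word groups
theorem lwt_merge_flat (tl : List (String × Int × String)) (ws : List String) (s : Int) :
    lwtMerge (PySem.List.enumerate ws s) ((PySem.List.enumerate ws s).flatMap (fun q => lwtGroup tl q.1 q.2))
      = ws.map (fun w => (w, (tl.filter (fun row => PySem.Str.count row.1 w == 1)).map (fun row => (row.2.1, row.2.2)))) := by
  induction ws generalizing s with
  | nil => simp [PySem.List.enumerate, lwtMerge]
  | cons w ws ih =>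
    rw [lwt_enumerate_cons]
    simp only [List.flatMap_cons, lwtMerge]
    have hr : ∀ e ∈ (PySem.List.enumerate ws (s + 1)).flatMap (fun q => lwtGroup tl q.1 q.2), e.1.1 ≠ s := by
      intro e he
      rw [List.mem_flatMap] at he
      obtain ⟨q, hq, hqe⟩ := he
      rw [PySem.List.mem_enumerate_iff] at hq
      obtain ⟨k, hk, rfl⟩ := hq
      rw [lwt_mem_group_fst hqe]
      omega
    rw [lwt_run_spec s (lwtGroup tl s w) _ (fun e he => lwt_mem_group_fst he) hr]
    rw [List.map_cons]
    exact congrArg₂ _ (congrArg _ (lwt_group_snd tl 0 s w)) (ih (s + 1))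

-- A's output in the same normal form
theorem lwt_A_eq (tl : List (String × Int × String)) :
    likes_word_time_list tl
      = policyWords.map (fun w => (w, (tl.filter (fun row => PySem.Str.count row.1 w == 1)).map (fun row => (row.2.1, row.2.2)))) := by
  unfold likes_word_time_list
  rw [PySem.List.foldl_append_singleton_eq_map]
  simp only [List.nil_append]
  apply List.map_congr_left
  intro w _
  rw [PySem.List.foldl_append_if]
  simp

-- ===== VERDICT (by name: the statement is the Claim_ definition above) =====
theorem likes_word_time_list_spec : Claim_equal_likes_word_time_list := by
  intro tweet_list _
  unfold Spec_likes_word_time_list likes_word_time_list_alt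
  rw [lwt_sorted_events, lwt_A_eq]
  exact (lwt_merge_flat tweet_list policyWords 0).symm
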